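-- pv_equiv track=rewrite | github.com/BenMusch/scotus_laughter | app/pdf_parser.py | _remove_line_nums
-- ===== SOURCE A (Python) =====
-- def _remove_line_nums(words, nums):
--     i = 0
--     while (words and nums) and i < len(words):
--         if words[i] == nums[0]:
--             words = words[:i] + words[(i+1):]
--             nums = nums[1:]
--         i += 1
--     return " ".join(words)
-- ===== SOURCE B (Python) =====
-- def _remove_line_nums(words, nums):
--     # One pass with a pointer into nums; after a removal the next word is
--     # kept without comparison (matching the original's index skip).
--     out = []
--     j = 0
--     skip = False
--     for w in words:
--         if skip:
--             out.append(w)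
--             skip = False
--         elif j < len(nums) and w == nums[j]:
--             j += 1
--             skip = True
--         else:
--             out.append(w)
--     return " ".join(out)
-- ===== Notes on version B (the rewrite author's own statement) =====
-- stated objective: faster
-- what changed: Replaced the re-slicing while-loop (which rebuilds the list on every match) by a single left-to-right pass with a pointer into nums and a one-word skip flag, appending kept words to an output list.
import Mathlib
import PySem

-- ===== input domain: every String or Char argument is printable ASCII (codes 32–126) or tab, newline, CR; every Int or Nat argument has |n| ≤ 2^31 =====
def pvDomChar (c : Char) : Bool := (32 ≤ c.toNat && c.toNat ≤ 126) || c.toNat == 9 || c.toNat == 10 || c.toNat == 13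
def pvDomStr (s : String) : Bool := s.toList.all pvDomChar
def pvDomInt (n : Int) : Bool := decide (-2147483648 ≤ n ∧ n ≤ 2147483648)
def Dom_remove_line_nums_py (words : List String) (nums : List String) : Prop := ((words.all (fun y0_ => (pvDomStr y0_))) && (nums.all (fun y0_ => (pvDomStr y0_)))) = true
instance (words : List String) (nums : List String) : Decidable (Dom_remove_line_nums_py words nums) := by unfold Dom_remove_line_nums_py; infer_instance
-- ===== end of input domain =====

-- B replaces A's quadratic slice-and-rebuild while-loop by one linear pass (same return value; A only rebinds locals, no caller-visible mutation).

-- ===== PORT A =====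
-- while (words and nums) and i < len(words): …
-- words[:i] = take i, words[(i+1):] = drop (i+1) (exact: indices are nonnegative); words[i]/nums[0] via getElem? (in range under the guard)
def pvALoop (words : List String) (nums : List String) (i : Nat) : List String :=
  if words ≠ [] ∧ nums ≠ [] ∧ i < words.length then
    if words[i]? = nums[0]? then
      pvALoop (words.take i ++ words.drop (i+1)) (nums.drop 1) (i+1)
    else
      pvALoop words nums (i+1)
  else words
termination_by words.length + 1 - i
decreasing_by
  · simp [List.length_take, List.length_drop]; omega
  · omega

def remove_line_nums_py (words : List String) (nums : List String) : String :=
  PySem.Str.join " " (pvALoop words nums 0)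

-- ===== PORT B =====
-- one pass: skip flag keeps the word after a match without comparison; remaining nums passed as a list (the pointer j)
def pvBLoop : List String → List String → Bool → List String
  | [], _, _ => []
  | w :: ws, nums, skip =>
    if skip then w :: pvBLoop ws nums false
    else match nums with
      | [] => w :: pvBLoop ws [] false
      | n :: ns => if w = n then pvBLoop ws ns true else w :: pvBLoop ws (n :: ns) false

def remove_line_nums_py_alt (words : List String) (nums : List String) : String :=
  PySem.Str.join " " (pvBLoop words nums false)

-- ===== PRECONDITION & SPEC =====
def Spec_remove_line_nums_py (words : List String) (nums : List String) (out : String) : Prop := out = remove_line_nums_py_alt words nums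
instance (words : List String) (nums : List String) (out : String) : Decidable (Spec_remove_line_nums_py words nums out) := by unfold Spec_remove_line_nums_py; infer_instance

-- ===== CLAIM (what is proved, stated in full; the proofs are below) =====
def Claim_equal_remove_line_nums_py : Prop := ∀ (words : List String) (nums : List String), Dom_remove_line_nums_py words nums → Spec_remove_line_nums_py words nums (remove_line_nums_py words nums)

-- ===== LEMMAS AND PROOFS =====

theorem pvBLoop_nil_nums (ws : List String) (b : Bool) : pvBLoop ws [] b = ws := by
  induction ws generalizing b with
  | nil => rfl
  | cons w ws ih => cases b <;> simp [pvBLoop, ih]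

theorem pvALoop_eq_pvBLoop (n : Nat) : ∀ (pre rest nums : List String), rest.length ≤ n →
    pvALoop (pre ++ rest) nums pre.length = pre ++ pvBLoop rest nums false := by
  induction n with
  | zero =>
    intro pre rest nums h
    have : rest = [] := List.eq_nil_of_length_eq_zero (Nat.le_zero.mp h)
    subst this
    rw [pvALoop]
    simp [pvBLoop]
  | succ n ih =>
    intro pre rest nums h
    cases rest with
    | nil => rw [pvALoop]; simp [pvBLoop]
    | cons w ws =>
      cases nums with
      | nil =>
        rw [pvALoop]
        simp [pvBLoop_nil_nums, pvBLoop]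
      | cons m ms =>
        have hlt : pre.length < (pre ++ w :: ws).length := by simp
        have hget : (pre ++ w :: ws)[pre.length]? = some w := by
          rw [List.getElem?_append_right (Nat.le_refl _)]
          simp
        rw [pvALoop]
        rw [if_pos ⟨by simp, by simp, hlt⟩, hget]
        by_cases hw : w = m
        · subst hw
          rw [if_pos (by simp)]
          have htake : (pre ++ w :: ws).take pre.length = pre := List.take_left
          have hdrop : (pre ++ w :: ws).drop (pre.length + 1) = ws := by
            have : pre ++ w :: ws = (pre ++ [w]) ++ ws := by simp
            rw [this]
            have hlen : pre.length + 1 = (pre ++ [w]).length := by simp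
            rw [hlen, List.drop_left]
          rw [htake, hdrop]
          simp only [List.drop_one, List.tail_cons]
          cases ws with
          | nil =>
            rw [pvALoop]
            simp [pvBLoop]
          | cons v vs =>
            have hpre : pre ++ v :: vs = (pre ++ [v]) ++ vs := by simp
            have hlen : pre.length + 1 = (pre ++ [v]).length := by simp
            rw [hpre, hlen, ih (pre ++ [v]) vs ms (by simp at h ⊢; omega)]
            simp [pvBLoop]
        · rw [if_neg (by simp [hw])]
          have hpre : pre ++ w :: ws = (pre ++ [w]) ++ ws := by simp
          have hlen : pre.length + 1 = (pre ++ [w]).length := by simp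
          conv_lhs => rw [hpre, hlen]
          rw [ih (pre ++ [w]) ws (m :: ms) (by simp at h ⊢; omega)]
          simp [pvBLoop, hw]

-- ===== VERDICT (by name: the statement is the Claim_ definition above) =====
theorem remove_line_nums_py_spec : Claim_equal_remove_line_nums_py := by
  intro words nums _
  unfold Spec_remove_line_nums_py remove_line_nums_py remove_line_nums_py_alt
  have := pvALoop_eq_pvBLoop words.length [] words nums (Nat.le_refl _)
  simpa using congrArg (PySem.Str.join " ") this
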